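-- pv_equiv track=rewrite | github.com/enspyrco/tech_world | tool/generate_barrier_indices.py | format_row_summary
-- ===== SOURCE A (Python) =====
-- def format_row_summary(indices: list[int], columns: int, rows: int) -> str:
--     """Per-row summary: row number, count, and range of non-empty tiles."""
--     index_set = set(indices)
--     lines: list[str] = []
--     for row in range(rows):
--         row_start = row * columns
--         row_indices = [i for i in range(row_start, row_start + columns) if i in index_set]
--         if row_indices:
--             cols = [i - row_start for i in row_indices]
--             lines.append(
--                 f"  // Row {row:3d}: {len(row_indices):2d}/{columns} non-empty "
--                 f"(cols {cols[0]}–{cols[-1]})"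
--             )
--         else:
--             lines.append(f"  // Row {row:3d}:  0/{columns} (empty)")
--     return "\n".join(lines)
-- ===== SOURCE B (Python) =====
-- def format_row_summary(indices: list[int], columns: int, rows: int) -> str:
--     """Per-row summary via one bucketing pass over the distinct indices."""
--     stats: dict[int, tuple[int, int, int]] = {}
--     if columns > 0:
--         for i in set(indices):
--             if 0 <= i < rows * columns:
--                 row, col = divmod(i, columns)
--                 if row in stats:
--                     c, lo, hi = stats[row]
--                     stats[row] = (c + 1, min(lo, col), max(hi, col))
--                 else:
--                     stats[row] = (1, col, col)
--     lines: list[str] = []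
--     for row in range(rows):
--         s = stats.get(row)
--         if s is not None:
--             lines.append(
--                 f"  // Row {row:3d}: {s[0]:2d}/{columns} non-empty "
--                 f"(cols {s[1]}–{s[2]})"
--             )
--         else:
--             lines.append(f"  // Row {row:3d}:  0/{columns} (empty)")
--     return "\n".join(lines)
-- ===== Notes on version B (the rewrite author's own statement) =====
-- stated objective: faster
-- what changed: Instead of scanning every cell of every row and testing set membership (O(rows*columns)), B makes one bucketing pass over the distinct indices, keeping count/min-col/max-col per row in a dict, then emits the per-row lines by lookup.
import Mathlib
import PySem

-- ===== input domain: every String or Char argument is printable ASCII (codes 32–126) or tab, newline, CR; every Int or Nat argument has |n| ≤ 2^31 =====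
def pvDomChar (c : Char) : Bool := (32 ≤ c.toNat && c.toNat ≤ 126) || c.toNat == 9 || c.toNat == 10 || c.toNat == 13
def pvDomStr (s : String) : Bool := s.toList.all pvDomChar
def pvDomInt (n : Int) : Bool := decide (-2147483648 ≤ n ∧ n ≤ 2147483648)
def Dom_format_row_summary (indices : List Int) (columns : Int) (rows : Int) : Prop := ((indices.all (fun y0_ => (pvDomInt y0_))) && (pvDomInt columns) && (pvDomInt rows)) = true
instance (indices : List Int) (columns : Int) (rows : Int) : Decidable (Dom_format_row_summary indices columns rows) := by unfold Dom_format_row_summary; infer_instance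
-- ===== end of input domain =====

-- B replaces A's O(rows*columns) cell-by-cell scan with one bucketing pass over the
-- distinct indices (count/min-col/max-col per row in a dict) followed by per-row lookups.

-- Shared formatting helpers (Python f-string builtins, exact):
-- f"{n:wd}" = str(n) right-justified with spaces to minimum width w
def pvFmtWidth (w : Nat) (n : Int) : List Char :=
  let s := PySem.Int.toChars n
  List.replicate (w - s.length) ' ' ++ s

-- the non-empty-row line:  "  // Row {row:3d}: {cnt:2d}/{columns} non-empty (cols {lo}–{hi})"
def pvLineFull (row cnt columns lo hi : Int) : List Char :=
  "  // Row ".toList ++ pvFmtWidth 3 row ++ ": ".toList ++ pvFmtWidth 2 cnt ++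
  "/".toList ++ PySem.Int.toChars columns ++ " non-empty (cols ".toList ++
  PySem.Int.toChars lo ++ "–".toList ++ PySem.Int.toChars hi ++ ")".toList

-- the empty-row line:  "  // Row {row:3d}:  0/{columns} (empty)"
def pvLineEmpty (row columns : Int) : List Char :=
  "  // Row ".toList ++ pvFmtWidth 3 row ++ ":  0/".toList ++
  PySem.Int.toChars columns ++ " (empty)".toList

-- ===== PORT A =====
def format_row_summary (indices : List Int) (columns : Int) (rows : Int) : String :=
  let indexSet : PySem.Set Int := PySem.Set.ofList indices
  let lines : List (List Char) :=
    (PySem.List.pyRange 0 rows 1).foldl (fun lines row =>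
      let rowStart := row * columns
      let rowIndices := (PySem.List.pyRange rowStart (rowStart + columns) 1).filter
        (fun i => PySem.Set.contains indexSet i)
      if rowIndices ≠ [] then
        let cols := rowIndices.map (fun i => i - rowStart)
        -- cols[0] / cols[-1]: the branch guarantees cols ≠ [], so pyGetD's default is unreachable
        lines ++ [pvLineFull row (rowIndices.length : Int) columns
          (PySem.List.pyGetD cols 0 0) (PySem.List.pyGetD cols (-1) 0)]
      else
        lines ++ [pvLineEmpty row columns]) []
  String.ofList (PySem.Chars.join "\n".toList lines)

-- ===== PORT B =====
def format_row_summary_alt (indices : List Int) (columns : Int) (rows : Int) : String :=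
  let stats : PySem.Dict Int (Int × Int × Int) :=
    if columns > 0 then
      (PySem.Set.ofList indices).foldl (fun d i =>
        if 0 ≤ i ∧ i < rows * columns then
          match d.get? (PySem.Int.floordiv i columns) with
          | some (c, lo, hi) =>
              d.insert (PySem.Int.floordiv i columns)
                (c + 1, min lo (PySem.Int.mod i columns), max hi (PySem.Int.mod i columns))
          | none =>
              d.insert (PySem.Int.floordiv i columns)
                (1, PySem.Int.mod i columns, PySem.Int.mod i columns)
        else d) PySem.Dict.empty
    else PySem.Dict.empty
  let lines : List (List Char) :=
    (PySem.List.pyRange 0 rows 1).foldl (fun lines row =>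
      match stats.get? row with
      | some (c, lo, hi) => lines ++ [pvLineFull row c columns lo hi]
      | none => lines ++ [pvLineEmpty row columns]) []
  String.ofList (PySem.Chars.join "\n".toList lines)

-- ===== PRECONDITION & SPEC =====
def Spec_format_row_summary (indices : List Int) (columns : Int) (rows : Int) (out : String) : Prop := out = format_row_summary_alt indices columns rows
instance (indices : List Int) (columns : Int) (rows : Int) (out : String) : Decidable (Spec_format_row_summary indices columns rows out) := by unfold Spec_format_row_summary; infer_instance

-- ===== CLAIM (what is proved, stated in full; the proofs are below) =====
def Claim_equal_format_row_summary : Prop := ∀ (indices : List Int) (columns : Int) (rows : Int), Dom_format_row_summary indices columns rows → Spec_format_row_summary indices columns rows (format_row_summary indices columns rows)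

-- ===== LEMMAS AND PROOFS =====

def pvStep (o : Option (Int × Int × Int)) (c : Int) : Option (Int × Int × Int) :=
  match o with
  | some (n, lo, hi) => some (n + 1, min lo c, max hi c)
  | none => some (1, c, c)

-- predicate equivalence for one bucket
theorem pv_pred (columns rows row : Int) (hc : 0 < columns) (h0 : 0 ≤ row) (h1 : row < rows) (i : Int) :
    (decide (0 ≤ i ∧ i < rows * columns) && decide (PySem.Int.floordiv i columns = row))
      = decide (row * columns ≤ i ∧ i < row * columns + columns) := by
  have hnn : 0 ≤ row * columns := mul_nonneg h0 hc.le
  have hub : (row + 1) * columns ≤ rows * columns :=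
    mul_le_mul_of_nonneg_right (by omega) hc.le
  have hexp : (row + 1) * columns = row * columns + columns := by ring
  simp only [← Bool.decide_and]
  rw [decide_eq_decide, PySem.Int.floordiv_eq_iff_of_pos hc]
  constructor
  · rintro ⟨_, h3⟩; omega
  · rintro ⟨h2, h3⟩
    refine ⟨⟨by omega, by omega⟩, by omega, by omega⟩

theorem pv_mod_eq (columns row i : Int) (hc : 0 < columns)
    (h2 : row * columns ≤ i) (h3 : i < row * columns + columns) :
    PySem.Int.mod i columns = i - row * columns := by
  have hfd : PySem.Int.floordiv i columns = row :=
    (PySem.Int.floordiv_eq_iff_of_pos hc).2 ⟨h2, by nlinarith⟩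
  have := PySem.Int.floordiv_mul_add_mod i columns
  rw [hfd] at this; omega

theorem pv_step_fold_some (cs : List Int) (n lo hi : Int) :
    cs.foldl pvStep (some (n, lo, hi)) =
      some (n + cs.length, cs.foldl min lo, cs.foldl max hi) := by
  induction cs generalizing n lo hi with
  | nil => simp
  | cons c t ih => simp [pvStep, ih]; omega

theorem pv_step_fold_perm (l₁ l₂ : List Int) (h : l₁.Perm l₂) :
    l₁.foldl pvStep none = l₂.foldl pvStep none := by
  haveI : RightCommutative pvStep := by
    constructor
    intro o a b
    rcases o with _ | ⟨n, lo, hi⟩ <;> simp [pvStep] <;> omega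
  exact h.foldl_eq _

theorem pv_get?_bucketFold (columns N : Int) (l : List Int)
    (d : PySem.Dict Int (Int × Int × Int)) (r : Int) :
    (l.foldl (fun d i =>
      if 0 ≤ i ∧ i < N then
        match d.get? (PySem.Int.floordiv i columns) with
        | some (c, lo, hi) =>
            d.insert (PySem.Int.floordiv i columns)
              (c + 1, min lo (PySem.Int.mod i columns), max hi (PySem.Int.mod i columns))
        | none =>
            d.insert (PySem.Int.floordiv i columns)
              (1, PySem.Int.mod i columns, PySem.Int.mod i columns)
      else d) d).get? r
    = ((l.filter (fun i => decide (0 ≤ i ∧ i < N) &&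
          decide (PySem.Int.floordiv i columns = r))).map
        (fun i => PySem.Int.mod i columns)).foldl pvStep (d.get? r) := by
  induction l generalizing d with
  | nil => simp
  | cons i t ih =>
    simp only [List.foldl_cons, List.filter_cons]
    by_cases hg : 0 ≤ i ∧ i < N
    · by_cases hr : PySem.Int.floordiv i columns = r
      · rw [if_pos hg]
        rcases hd : d.get? (PySem.Int.floordiv i columns) with _ | ⟨⟨n, lo, hi⟩⟩ <;>
          simp only [hd, ih] <;> rw [hr] at hd <;>
          simp [hr, hd, PySem.Dict.get?_insert_self, pvStep, hg]
      · rw [if_pos hg]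
        rcases hd : d.get? (PySem.Int.floordiv i columns) with _ | ⟨⟨n, lo, hi⟩⟩ <;>
          simp only [hd, ih, PySem.Dict.get?_insert_of_ne _ _ (fun h => hr h.symm)] <;>
          simp [hr, hg]
    · rw [if_neg hg]
      simp only [ih]
      simp [hg]

-- B's stats dict, looked up at row, for row ∈ range(rows), columns > 0:
theorem pv_stats_get (indices : List Int) (columns rows row : Int)
    (hc : 0 < columns) (h0 : 0 ≤ row) (h1 : row < rows) :
    ((PySem.Set.ofList indices).foldl (fun d i =>
        if 0 ≤ i ∧ i < rows * columns then
          match d.get? (PySem.Int.floordiv i columns) with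
          | some (c, lo, hi) =>
              d.insert (PySem.Int.floordiv i columns)
                (c + 1, min lo (PySem.Int.mod i columns), max hi (PySem.Int.mod i columns))
          | none =>
              d.insert (PySem.Int.floordiv i columns)
                (1, PySem.Int.mod i columns, PySem.Int.mod i columns)
        else d) (PySem.Dict.empty : PySem.Dict Int (Int × Int × Int))).get? row
    = (((PySem.List.pyRange (row * columns) (row * columns + columns) 1).filter
          (fun i => PySem.Set.contains (PySem.Set.ofList indices) i)).map
        (fun i => i - row * columns)).foldl pvStep none := by
  rw [pv_get?_bucketFold, PySem.Dict.get?_empty]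
  rw [List.filter_congr (fun i _ => pv_pred columns rows row hc h0 h1 i)]
  rw [List.map_congr_left (fun i hi => by
    have hb := (List.mem_filter.1 hi).2
    simp only [decide_eq_true_eq] at hb
    exact pv_mod_eq columns row i hc hb.1 hb.2)]
  apply pv_step_fold_perm
  apply List.Perm.map
  apply (List.perm_ext_iff_of_nodup ((PySem.Set.nodup_ofList _).filter _)
    ((PySem.List.nodup_pyRange_one _ _).filter _)).2
  intro x
  simp only [List.mem_filter, PySem.Set.mem_ofList, PySem.List.mem_pyRange_one,
    PySem.Set.contains, decide_eq_true_eq, List.contains_iff_mem]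
  tauto

-- cols[0] and cols[-1] on a non-empty list are its head and last
theorem pv_pyGetD_zero (c : Int) (cs : List Int) (d : Int) :
    PySem.List.pyGetD (c :: cs) 0 d = c := by
  simp [pysem]

theorem pv_pyGetD_neg_one (c : Int) (cs : List Int) (d : Int) :
    PySem.List.pyGetD (c :: cs) (-1) d = (c :: cs).getLast (by simp) := by
  rw [List.getLast_eq_getElem]
  simp [PySem.List.pyGetD, PySem.List.pyGet?, PySem.List.pyIdx?]
  congr 1

-- head of a strictly increasing list is its running minimum
theorem pv_foldl_min_head (x : Int) (t : List Int) (h : (x :: t).Pairwise (· < ·)) :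
    t.foldl min x = x := by
  rcases PySem.List.foldl_min_mem t x with h1 | h1
  · exact h1
  · have := (PySem.List.foldl_min_le t x).1
    have hx := (List.pairwise_cons.1 h).1 _ h1
    omega

-- last of a strictly increasing list is its running maximum
theorem pv_foldl_max_last (x : Int) (t : List Int) (h : (x :: t).Pairwise (· < ·)) :
    t.foldl max x = (x :: t).getLast (by simp) := by
  induction t generalizing x with
  | nil => simp
  | cons c t' ih =>
    have hxc : x < c := (List.pairwise_cons.1 h).1 _ (by simp)
    have hm : max x c = c := by omega
    simp only [List.foldl_cons, hm]
    rw [ih c (List.pairwise_cons.1 h).2]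
    rcases t' with _ | _ <;> simp

-- one row's line: A's scan of the row's cells equals B's bucket lookup
theorem pv_row (indices : List Int) (columns rows row : Int)
    (h0 : 0 ≤ row) (h1 : row < rows) :
    (let rowStart := row * columns
     let rowIndices := (PySem.List.pyRange rowStart (rowStart + columns) 1).filter
       (fun i => PySem.Set.contains (PySem.Set.ofList indices) i)
     if rowIndices ≠ [] then
       pvLineFull row (rowIndices.length : Int) columns
         (PySem.List.pyGetD (rowIndices.map (fun i => i - rowStart)) 0 0)
         (PySem.List.pyGetD (rowIndices.map (fun i => i - rowStart)) (-1) 0)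
     else pvLineEmpty row columns)
    = (match (if columns > 0 then
          (PySem.Set.ofList indices).foldl (fun d i =>
            if 0 ≤ i ∧ i < rows * columns then
              match d.get? (PySem.Int.floordiv i columns) with
              | some (c, lo, hi) =>
                  d.insert (PySem.Int.floordiv i columns)
                    (c + 1, min lo (PySem.Int.mod i columns), max hi (PySem.Int.mod i columns))
              | none =>
                  d.insert (PySem.Int.floordiv i columns)
                    (1, PySem.Int.mod i columns, PySem.Int.mod i columns)
            else d) (PySem.Dict.empty : PySem.Dict Int (Int × Int × Int))
        else PySem.Dict.empty).get? row with
       | some (c, lo, hi) => pvLineFull row c columns lo hi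
       | none => pvLineEmpty row columns) := by
  by_cases hc : columns > 0
  · rw [if_pos hc, pv_stats_get indices columns rows row hc h0 h1]
    rcases hLc : (PySem.List.pyRange (row * columns) (row * columns + columns) 1).filter
        (fun i => PySem.Set.contains (PySem.Set.ofList indices) i) with _ | ⟨x, t⟩
    · simp only [hLc]
      simp
    · have hpw : ((PySem.List.pyRange (row * columns) (row * columns + columns) 1).filter
          (fun i => PySem.Set.contains (PySem.Set.ofList indices) i)).Pairwise (· < ·) :=
        List.Pairwise.filter _ (PySem.List.pairwise_lt_pyRange_one _ _)
      rw [hLc] at hpw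
      have hpwm : ((x - row * columns) :: t.map (fun i => i - row * columns)).Pairwise (· < ·) := by
        have := (List.pairwise_map (f := fun i => i - row * columns)
          (l := x :: t) (R := (· < ·))).2 (by
            apply List.Pairwise.imp _ hpw
            intro a b hab; omega)
        simpa using this
      simp only [hLc, List.map_cons, List.foldl_cons, ne_eq, reduceCtorEq,
        not_false_eq_true, if_true, List.length_cons]
      show pvLineFull row _ columns _ _ = _
      rw [show pvStep none (x - row * columns) = some (1, x - row * columns, x - row * columns) from rfl,
        pv_step_fold_some]
      simp only []
      rw [pv_foldl_min_head _ _ hpwm, pv_foldl_max_last _ _ hpwm]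
      rw [pv_pyGetD_zero, pv_pyGetD_neg_one]
      congr 1
      · simp; omega
  · rw [if_neg hc]
    have hnil : PySem.List.pyRange (row * columns) (row * columns + columns) 1 = [] :=
      PySem.List.pyRange_one_eq_nil (by omega)
    simp [hnil]

-- ===== VERDICT (by name: the statement is the Claim_ definition above) =====
-- a loop appending one line per element equals the map of its per-element line
theorem pv_foldl_lines_eq {α β : Type} (l : List α) (f g : List β → α → List β)
    (u v : α → β) (accA accB : List β) (hacc : accA = accB)
    (hf : ∀ acc x, f acc x = acc ++ [u x]) (hg : ∀ acc x, g acc x = acc ++ [v x])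
    (huv : ∀ x ∈ l, u x = v x) : l.foldl f accA = l.foldl g accB := by
  induction l generalizing accA accB with
  | nil => simpa using hacc
  | cons x t ih =>
    simp only [List.foldl_cons, hf, hg]
    exact ih _ _ (by rw [hacc, huv x (by simp)]) (fun y hy => huv y (List.mem_cons_of_mem _ hy))

theorem format_row_summary_spec : Claim_equal_format_row_summary := by
  intro indices columns rows _
  unfold Spec_format_row_summary
  simp only [format_row_summary, format_row_summary_alt]
  congr 2
  apply pv_foldl_lines_eq _ _ _
    (u := fun (row : Int) =>
      if ((PySem.List.pyRange (row * columns) (row * columns + columns) 1).filter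
            (fun i => PySem.Set.contains (PySem.Set.ofList indices) i)) ≠ [] then
        pvLineFull row
          (((PySem.List.pyRange (row * columns) (row * columns + columns) 1).filter
            (fun i => PySem.Set.contains (PySem.Set.ofList indices) i)).length : Int) columns
          (PySem.List.pyGetD (((PySem.List.pyRange (row * columns) (row * columns + columns) 1).filter
            (fun i => PySem.Set.contains (PySem.Set.ofList indices) i)).map
              (fun i => i - row * columns)) 0 0)
          (PySem.List.pyGetD (((PySem.List.pyRange (row * columns) (row * columns + columns) 1).filter
            (fun i => PySem.Set.contains (PySem.Set.ofList indices) i)).map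
              (fun i => i - row * columns)) (-1) 0)
      else pvLineEmpty row columns)
    (v := fun (row : Int) =>
      match (if columns > 0 then
          (PySem.Set.ofList indices).foldl (fun d i =>
            if 0 ≤ i ∧ i < rows * columns then
              match d.get? (PySem.Int.floordiv i columns) with
              | some (c, lo, hi) =>
                  d.insert (PySem.Int.floordiv i columns)
                    (c + 1, min lo (PySem.Int.mod i columns), max hi (PySem.Int.mod i columns))
              | none =>
                  d.insert (PySem.Int.floordiv i columns)
                    (1, PySem.Int.mod i columns, PySem.Int.mod i columns)
            else d) (PySem.Dict.empty : PySem.Dict Int (Int × Int × Int))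
        else PySem.Dict.empty).get? row with
      | some (c, lo, hi) => pvLineFull row c columns lo hi
      | none => pvLineEmpty row columns)
    _ _ rfl
  · intro acc x
    dsimp only
    split <;> rfl
  · intro acc x
    rcases hsome : (if columns > 0 then
          (PySem.Set.ofList indices).foldl (fun d i =>
            if 0 ≤ i ∧ i < rows * columns then
              match d.get? (PySem.Int.floordiv i columns) with
              | some (c, lo, hi) =>
                  d.insert (PySem.Int.floordiv i columns)
                    (c + 1, min lo (PySem.Int.mod i columns), max hi (PySem.Int.mod i columns))
              | none =>
                  d.insert (PySem.Int.floordiv i columns)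
                    (1, PySem.Int.mod i columns, PySem.Int.mod i columns)
            else d) (PySem.Dict.empty : PySem.Dict Int (Int × Int × Int))
        else PySem.Dict.empty).get? x with _ | ⟨⟨c, lo, hi⟩⟩ <;>
      rw [hsome]
  · intro row hrow
    rw [PySem.List.mem_pyRange_one] at hrow
    exact pv_row indices columns rows row hrow.1 hrow.2
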